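-- pv_equiv track=rewrite | github.com/CatherineFlower/Discretka | pr6.py | odd_composites
-- ===== SOURCE A (Python) =====
-- SAMPLE_COMPOSITES = 2000  # размер выборки составных для эмпирики MR
--
-- def sieve(n: int):
--     s = [True] * (n + 1)
--     s[:2] = [False, False]
--     p = 2
--     while p * p <= n:
--         if s[p]:
--             s[p*p:n+1:p] = [False] * (((n - p*p)//p) + 1)
--         p += 1
--     return [i for i, v in enumerate(s) if v]
--
-- def odd_composites(limit: int, k: int = SAMPLE_COMPOSITES, primes_set=None):
--     if primes_set is None:
--         primes_set = set(sieve(limit))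
--     out, x = [], 9
--     while x <= limit and len(out) < k:
--         if x % 2 == 1 and x not in primes_set:
--             out.append(x)
--         x += 2
--     return out
-- ===== SOURCE B (Python) =====
-- SAMPLE_COMPOSITES = 2000
--
-- def _is_odd_composite(x):
--     # x is odd and >= 9 here; composite iff it has an odd divisor d with 3 <= d, d*d <= x
--     d = 3
--     while d * d <= x:
--         if x % d == 0:
--             return True
--         d += 2
--     return False
--
-- def odd_composites(limit, k=SAMPLE_COMPOSITES, primes_set=None):
--     out = []
--     for x in range(9, limit + 1, 2):
--         if len(out) >= k:
--             break
--         if primes_set is None: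
--             if _is_odd_composite(x):
--                 out.append(x)
--         elif x not in primes_set:
--             out.append(x)
--     return out
-- ===== Notes on version B (the rewrite author's own statement) =====
-- stated objective: faster
-- what changed: B drops the full sieve of Eratosthenes over [0, limit] and instead tests each odd candidate directly by trial division up to its square root, stopping as soon as k composites are collected, so no O(limit)-sized array is ever built.
import Mathlib
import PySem

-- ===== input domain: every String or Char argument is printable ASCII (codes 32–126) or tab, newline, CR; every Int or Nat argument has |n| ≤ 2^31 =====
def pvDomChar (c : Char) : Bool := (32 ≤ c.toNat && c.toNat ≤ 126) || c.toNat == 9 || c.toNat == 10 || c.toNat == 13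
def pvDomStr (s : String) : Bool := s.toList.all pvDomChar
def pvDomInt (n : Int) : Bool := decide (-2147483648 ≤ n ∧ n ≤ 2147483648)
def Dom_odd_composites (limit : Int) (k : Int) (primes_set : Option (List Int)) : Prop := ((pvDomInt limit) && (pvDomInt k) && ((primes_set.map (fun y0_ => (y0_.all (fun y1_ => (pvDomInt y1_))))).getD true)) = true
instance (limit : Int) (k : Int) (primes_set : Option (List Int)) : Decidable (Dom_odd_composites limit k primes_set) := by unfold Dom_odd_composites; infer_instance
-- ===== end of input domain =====

-- B replaces A's full sieve of Eratosthenes up to `limit` by direct trial division of each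
-- candidate, so no O(limit)-sized array is ever built when only k odd composites are wanted.

-- ===== PORT A =====

-- s[p*p : n+1 : p] = [False] * (((n - p*p)//p) + 1)  — clears indices p*p, p*p+p, …, ≤ n
-- (exact: Python's extended-slice assignment writes exactly those in-range positions)
def pvClear (s : List Bool) (n p i : Int) : List Bool :=
  if _h : i ≤ n ∧ 0 < p then pvClear (PySem.List.pySetD s i false) n p (i + p) else s
  termination_by (n + 1 - i).toNat
  decreasing_by omega

-- while p * p <= n: if s[p]: clear; p += 1
def pvSieveLoop (s : List Bool) (n p : Int) : List Bool :=
  if h : p * p ≤ n then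
    pvSieveLoop (if PySem.List.pyGetD s p false then pvClear s n p (p * p) else s) n (p + 1)
  else s
  termination_by (n + 1 - p).toNat
  decreasing_by
    have h4 : 4 * (p * p) ≥ 4 * p - 1 := by nlinarith [sq_nonneg (2 * p - 1)]
    omega

def pvSieve (n : Int) : List Int :=
  -- s = [True] * (n + 1); s[:2] = [False, False]  (Python slice assignment may grow the list)
  let s1 : List Bool := [false, false] ++ (List.replicate (n + 1).toNat true).drop 2
  let s := pvSieveLoop s1 n 2
  -- [i for i, v in enumerate(s) if v]
  (PySem.List.enumerate s 0).filterMap (fun iv => if iv.2 then some iv.1 else none)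

-- out, x = [], 9; while x <= limit and len(out) < k: …
def pvScanA (limit k : Int) (ps : List Int) (out : List Int) (x : Int) : List Int :=
  if h : x ≤ limit ∧ PySem.List.len out < k then
    pvScanA limit k ps
      (if PySem.Int.mod x 2 = 1 ∧ x ∉ ps then out ++ [x] else out) (x + 2)
  else out
  termination_by (limit + 1 - x).toNat
  decreasing_by omega

def odd_composites (limit : Int) (k : Int) (primes_set : Option (List Int)) : List Int :=
  let ps : List Int :=
    match primes_set with
    | none => PySem.Set.ofList (pvSieve limit)
    | some s => s
  pvScanA limit k ps [] 9

-- ===== PORT B =====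

-- d = 3; while d*d <= x: if x % d == 0: return True; d += 2; return False
def pvTrial (x d : Int) : Bool :=
  if h : d * d ≤ x then
    if PySem.Int.mod x d = 0 then true else pvTrial x (d + 2)
  else false
  termination_by (x + 1 - d).toNat
  decreasing_by
    have h4 : 4 * (d * d) ≥ 4 * d - 1 := by nlinarith [sq_nonneg (2 * d - 1)]
    omega

def pvIsOddComposite (x : Int) : Bool := pvTrial x 3

-- for x in range(9, limit+1, 2): if len(out) >= k: break; …
-- (range(9, limit+1, 2) is iterated lazily: x runs 9, 11, … while x < limit + 1)
def pvScanB (limit k : Int) (primes_set : Option (List Int)) (out : List Int) (x : Int) : List Int :=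
  if _h : x < limit + 1 then
    if k ≤ PySem.List.len out then out
    else
      pvScanB limit k primes_set
        (match primes_set with
         | none => if pvIsOddComposite x then out ++ [x] else out
         | some ps => if x ∉ ps then out ++ [x] else out) (x + 2)
  else out
  termination_by (limit + 1 - x).toNat
  decreasing_by omega

def odd_composites_alt (limit : Int) (k : Int) (primes_set : Option (List Int)) : List Int :=
  pvScanB limit k primes_set [] 9

-- ===== PRECONDITION & SPEC =====
def Spec_odd_composites (limit : Int) (k : Int) (primes_set : Option (List Int)) (out : List Int) : Prop := out = odd_composites_alt limit k primes_set
instance (limit : Int) (k : Int) (primes_set : Option (List Int)) (out : List Int) : Decidable (Spec_odd_composites limit k primes_set out) := by unfold Spec_odd_composites; infer_instance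

-- ===== CLAIM (what is proved, stated in full; the proofs are below) =====
def Claim_equal_odd_composites : Prop := ∀ (limit : Int) (k : Int) (primes_set : Option (List Int)), Dom_odd_composites limit k primes_set → Spec_odd_composites limit k primes_set (odd_composites limit k primes_set)

-- ===== LEMMAS AND PROOFS =====

theorem getD_set_eq (s : List Bool) (j m : Nat) (v : Bool) :
    (s.set j v).getD m false = if j = m ∧ j < s.length then v else s.getD m false := by
  simp only [List.getD, List.getElem?_set]
  by_cases h1 : j = m
  · subst h1
    by_cases h2 : j < s.length
    · simp [h2]
    · rw [if_pos rfl, if_neg h2, if_neg (by tauto), List.getElem?_eq_none (by omega : s.length ≤ j)]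
  · rw [if_neg h1, if_neg (by tauto)]

theorem pvClear_length (s : List Bool) (n p i : Int) :
    (pvClear s n p i).length = s.length := by
  rw [pvClear]
  split
  · rw [pvClear_length, PySem.List.length_pySetD]
  · rfl
  termination_by (n + 1 - i).toNat
  decreasing_by omega

theorem pvClear_getD (s : List Bool) (n p i : Int) (hp : 0 < p) (hi : 0 ≤ i) (m : Nat) :
    (pvClear s n p i).getD m false =
      if i ≤ (m : Int) ∧ (m : Int) ≤ n ∧ p ∣ ((m : Int) - i) then false else s.getD m false := by
  rw [pvClear]
  split
  · rename_i h
    rw [pvClear_getD _ _ _ _ hp (by omega) m]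
    have hset : (PySem.List.pySetD s i false).getD m false =
        if (m : Int) = i then false else s.getD m false := by
      rw [PySem.List.pySetD_of_nonneg (xs := s) (i := i) (v := false) hi, getD_set_eq]
      by_cases hmi : (m : Int) = i
      · rw [if_pos hmi]
        by_cases h2 : i.toNat < s.length
        · rw [if_pos ⟨by omega, h2⟩]
        · rw [if_neg (by tauto), List.getD_eq_default _ _ (by omega)]
      · rw [if_neg hmi, if_neg (by rintro ⟨h1, -⟩; omega)]
    rw [hset]
    by_cases hc : i ≤ (m : Int) ∧ (m : Int) ≤ n ∧ p ∣ ((m : Int) - i)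
    · rw [if_pos hc]
      by_cases hmi : (m : Int) = i
      · rw [if_neg (by omega), if_pos hmi]
      · have h1 : p ≤ (m : Int) - i := Int.le_of_dvd (by omega) hc.2.2
        have h2 : p ∣ ((m : Int) - (i + p)) := by
          have := hc.2.2.sub (dvd_refl p)
          simpa [sub_add_eq_sub_sub] using this
        rw [if_pos ⟨by omega, hc.2.1, h2⟩]
    · rw [if_neg hc]
      have hmi : ¬ (m : Int) = i := by
        intro he; exact hc ⟨by omega, by omega, by simp [he]⟩
      rw [if_neg hmi]
      have : ¬ (i + p ≤ (m : Int) ∧ (m : Int) ≤ n ∧ p ∣ ((m : Int) - (i + p))) := by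
        intro ⟨a1, a2, a3⟩
        have : p ∣ ((m : Int) - i) := by
          have := a3.add (dvd_refl p)
          simpa [sub_add_eq_sub_sub] using this
        exact hc ⟨by omega, a2, this⟩
      rw [if_neg this]
  · rename_i h
    rw [if_neg (by omega)]
  termination_by (n + 1 - i).toNat
  decreasing_by omega

theorem pvSieveLoop_length (s : List Bool) (n p : Int) :
    (pvSieveLoop s n p).length = s.length := by
  rw [pvSieveLoop]
  split
  · rw [pvSieveLoop_length]
    split
    · rw [pvClear_length]
    · rfl
  · rfl
  termination_by (n + 1 - p).toNat
  decreasing_by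
    have h4 : 4 * (p * p) ≥ 4 * p - 1 := by nlinarith [sq_nonneg (2 * p - 1)]
    omega

theorem pvSieveLoop_getD (s : List Bool) (n p : Int) (hp : 2 ≤ p)
    (inv : ∀ m : Nat, (m : Int) ≤ n →
      (s.getD m false = true ↔ 2 ≤ (m : Int) ∧
        ∀ q : Int, 2 ≤ q → q < p → q * q ≤ (m : Int) → ¬ q ∣ (m : Int)))
    (m : Nat) (hm : (m : Int) ≤ n) :
    ((pvSieveLoop s n p).getD m false = true ↔ 2 ≤ (m : Int) ∧
      ∀ q : Int, 2 ≤ q → q * q ≤ (m : Int) → ¬ q ∣ (m : Int)) := by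
  rw [pvSieveLoop]
  split
  · rename_i hpn
    -- step: establish the invariant for p + 1 on the updated list
    refine pvSieveLoop_getD _ n (p + 1) (by omega) ?_ m hm
    intro m' hm'
    have hpn' : p ≤ n := by nlinarith
    have hread : PySem.List.pyGetD s p false = s.getD p.toNat false := by
      have h := PySem.List.pyGetD_natCast s p.toNat false
      rw [show ((p.toNat : Nat) : Int) = p by omega] at h
      exact h
    by_cases hsp : PySem.List.pyGetD s p false = true
    · -- s[p] is true: p has no divisor q < p with q*q ≤ p; multiples ≥ p*p of p get cleared
      rw [if_pos hsp]
      rw [pvClear_getD s n p (p * p) (by omega) (by positivity) m']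
      constructor
      · rintro hgd
        have hcond : ¬ (p * p ≤ (m' : Int) ∧ (m' : Int) ≤ n ∧ p ∣ ((m' : Int) - p * p)) := by
          intro hc
          rw [if_pos hc] at hgd
          exact Bool.false_ne_true hgd
        rw [if_neg hcond] at hgd
        obtain ⟨h2m, hq⟩ := (inv m' hm').mp hgd
        refine ⟨h2m, ?_⟩
        intro q h2q hqp hqq hdvd
        rcases lt_or_ge q p with hlt | hge
        · exact hq q h2q hlt hqq hdvd
        · have hqep : q = p := by omega
          subst hqep
          exact hcond ⟨by omega, hm', by simpa using (dvd_sub hdvd (Dvd.intro q rfl))⟩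
      · rintro ⟨h2m, hq⟩
        have hnc : ¬ (p * p ≤ (m' : Int) ∧ (m' : Int) ≤ n ∧ p ∣ ((m' : Int) - p * p)) := by
          rintro ⟨hc1, -, hc3⟩
          have hdvd : p ∣ (m' : Int) := by
            have := hc3.add (Dvd.intro p rfl)
            simpa using this
          exact hq p (by omega) (by omega) hc1 hdvd
        rw [if_neg hnc]
        exact (inv m' hm').mpr ⟨h2m, fun q h2q hql hqq hd => hq q h2q (by omega) hqq hd⟩
    · -- s[p] is false: p itself has a small divisor, so its multiples are already cleared
      rw [if_neg hsp]
      have hmarked : ¬ (2 ≤ p ∧ ∀ q : Int, 2 ≤ q → q < p → q * q ≤ p → ¬ q ∣ p) := by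
        intro hcon
        apply hsp
        rw [hread]
        refine (inv p.toNat (by omega)).mpr ?_
        have : ((p.toNat : Nat) : Int) = p := by omega
        rw [this]
        exact hcon
      push Not at hmarked
      obtain ⟨q, h2q, hqp, hqq, hqd⟩ := hmarked hp
      constructor
      · intro hgd
        obtain ⟨h2m, hB⟩ := (inv m' hm').mp hgd
        refine ⟨h2m, ?_⟩
        intro r h2r hrp hrr hrd
        rcases lt_or_ge r p with hlt | hge
        · exact hB r h2r hlt hrr hrd
        · have hrep : r = p := by omega
          subst hrep
          -- q ∣ p ∣ m', q < p, q*q ≤ p ≤ p*p ≤ m'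
          have hqm : q ∣ (m' : Int) := hqd.trans hrd
          have hqqm : q * q ≤ (m' : Int) := by nlinarith
          exact hB q h2q hqp hqqm hqm
      · rintro ⟨h2m, hB⟩
        exact (inv m' hm').mpr ⟨h2m, fun r h2r hrl hrr hrd => hB r h2r (by omega) hrr hrd⟩
  · rename_i hpn
    constructor
    · intro hgd
      obtain ⟨h2m, hB⟩ := (inv m hm).mp hgd
      refine ⟨h2m, ?_⟩
      intro q h2q hqq hqd
      have hqp : q < p := by nlinarith
      exact hB q h2q hqp hqq hqd
    · rintro ⟨h2m, hB⟩
      exact (inv m hm).mpr ⟨h2m, fun q h2q _ hqq hqd => hB q h2q hqq hqd⟩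
  termination_by (n + 1 - p).toNat
  decreasing_by
    have h4 : 4 * (p * p) ≥ 4 * p - 1 := by nlinarith [sq_nonneg (2 * p - 1)]
    omega

theorem pvSieve_mem (n x : Int) (hx : 9 ≤ x) (hxn : x ≤ n) :
    (x ∈ pvSieve n ↔ ∀ q : Int, 2 ≤ q → q * q ≤ x → ¬ q ∣ x) := by
  have hn : 9 ≤ n := le_trans hx hxn
  simp only [pvSieve]
  set s1 : List Bool := [false, false] ++ (List.replicate (n + 1).toNat true).drop 2 with hs1
  have hlen1 : s1.length = (n + 1).toNat := by
    rw [hs1]; simp; omega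
  have hinv : ∀ m : Nat, (m : Int) ≤ n →
      (s1.getD m false = true ↔ 2 ≤ (m : Int) ∧
        ∀ q : Int, 2 ≤ q → q < 2 → q * q ≤ (m : Int) → ¬ q ∣ (m : Int)) := by
    intro m hmn
    have hrhs : (2 ≤ (m : Int) ∧ ∀ q : Int, 2 ≤ q → q < 2 → q * q ≤ (m : Int) → ¬ q ∣ (m : Int))
        ↔ 2 ≤ (m : Int) := by
      constructor
      · exact fun h => h.1
      · exact fun h => ⟨h, fun q h2 hlt => by omega⟩
    rw [hrhs]
    match m, hmn with
    | 0, _ => simp [hs1, List.getD]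
    | 1, _ => simp [hs1, List.getD]
    | (j + 2), hmn =>
        simp only [hs1, List.getD]
        rw [List.getElem?_append_right (by simp)]
        simp only [List.length_cons, List.length_nil]
        rw [List.getElem?_drop]
        rw [List.getElem?_replicate]
        rw [if_pos (by omega)]
        simp
  have hchar := pvSieveLoop_getD s1 n 2 (le_refl 2) hinv
  have hlen : (pvSieveLoop s1 n 2).length = (n + 1).toNat := by
    rw [pvSieveLoop_length, hlen1]
  constructor
  · intro hmem
    obtain ⟨iv, hiv, hf⟩ := List.mem_filterMap.mp hmem
    obtain ⟨k, hk, hkv⟩ := (PySem.List.mem_enumerate_iff _ 0 iv).mp hiv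
    subst hkv
    simp only at hf
    split at hf
    · rename_i hv
      have hxk : x = (k : Int) := by
        simp at hf; omega
      have := (hchar k (by omega)).mp (by rw [List.getD_eq_getElem _ _ hk]; exact hv)
      rw [← hxk] at this
      exact this.2
    · exact absurd hf (by simp)
  · intro hq
    refine List.mem_filterMap.mpr ⟨(x, true), ?_, by simp⟩
    refine (PySem.List.mem_enumerate_iff _ 0 _).mpr ⟨x.toNat, by omega, ?_⟩
    have hgd := (hchar x.toNat (by omega)).mpr
      ⟨by omega, by
        intro q h2 hqq hd
        refine hq q h2 (by omega) ?_
        have hcast : ((x.toNat : Nat) : Int) = x := by omega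
        rwa [hcast] at hd⟩
    have hklen : x.toNat < (pvSieveLoop s1 n 2).length := by omega
    have h2 : (pvSieveLoop s1 n 2)[x.toNat]'hklen = true := by
      rw [← List.getD_eq_getElem _ false hklen]
      exact hgd
    rw [Prod.mk.injEq]
    exact ⟨by omega, h2.symm⟩

theorem pvTrial_iff (x d : Int) (hd : 3 ≤ d) :
    (pvTrial x d = true ↔ ∃ e : Int, d ≤ e ∧ e * e ≤ x ∧ 2 ∣ (e - d) ∧ e ∣ x) := by
  rw [pvTrial]
  split
  · rename_i hdx
    by_cases hmod : PySem.Int.mod x d = 0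
    · rw [if_pos hmod]
      simp only [true_iff]
      exact ⟨d, le_refl d, hdx, by simp, (PySem.Int.mod_eq_zero_iff_dvd x d).mp hmod⟩
    · rw [if_neg hmod]
      rw [pvTrial_iff x (d + 2) (by omega)]
      constructor
      · rintro ⟨e, he1, he2, he3, he4⟩
        exact ⟨e, by omega, he2, by omega, he4⟩
      · rintro ⟨e, he1, he2, he3, he4⟩
        have hne : e ≠ d := by
          intro h
          subst h
          exact hmod ((PySem.Int.mod_eq_zero_iff_dvd x e).mpr he4)
        exact ⟨e, by omega, he2, by omega, he4⟩
  · rename_i hdx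
    simp only [Bool.false_eq_true, false_iff]
    rintro ⟨e, he1, he2, -, -⟩
    have : d * d ≤ e * e := by nlinarith
    omega
  termination_by (x + 1 - d).toNat
  decreasing_by
    have h4 : 4 * (d * d) ≥ 4 * d - 1 := by nlinarith [sq_nonneg (2 * d - 1)]
    omega

theorem pvCond_none (limit y : Int) (h9 : 9 ≤ y) (hl : y ≤ limit) (ho : 2 ∣ (y - 9)) :
    ((PySem.Int.mod y 2 = 1 ∧ y ∉ PySem.Set.ofList (pvSieve limit)) ↔ pvIsOddComposite y = true) := by
  have hm1 : PySem.Int.mod y 2 = 1 := by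
    have := PySem.Int.mod_eq_emod_of_pos (a := y) (b := 2) (by norm_num)
    omega
  have hmem : y ∈ PySem.Set.ofList (pvSieve limit) ↔ y ∈ pvSieve limit :=
    PySem.Set.mem_ofList (pvSieve limit) y
  rw [pvSieve_mem limit y h9 hl] at hmem
  rw [pvIsOddComposite, pvTrial_iff y 3 (le_refl 3)]
  constructor
  · rintro ⟨-, hnp⟩
    rw [hmem] at hnp
    push Not at hnp
    obtain ⟨q, h2q, hqq, hqd⟩ := hnp
    have hq2 : ¬ (2 ∣ q) := by
      intro h2dq
      have : (2 : Int) ∣ y := h2dq.trans hqd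
      omega
    refine ⟨q, by omega, hqq, by omega, hqd⟩
  · rintro ⟨e, he1, he2, he3, he4⟩
    refine ⟨hm1, ?_⟩
    rw [hmem]
    push Not
    exact ⟨e, by omega, he2, he4⟩

theorem pvScan_eq (limit k : Int) (ps : List Int) (ps? : Option (List Int)) (x : Int)
    (out : List Int) (hx : 9 ≤ x) (ho : 2 ∣ (x - 9))
    (hpt : ∀ y, 9 ≤ y → y ≤ limit → 2 ∣ (y - 9) →
      ((PySem.Int.mod y 2 = 1 ∧ y ∉ ps) ↔
        (match ps? with
         | none => pvIsOddComposite y = true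
         | some l => y ∉ l))) :
    pvScanA limit k ps out x = pvScanB limit k ps? out x := by
  rw [pvScanA, pvScanB.eq_def]
  by_cases hxl : x ≤ limit
  · rw [dif_pos (by omega : x < limit + 1)]
    by_cases hk : PySem.List.len out < k
    · rw [dif_pos ⟨hxl, hk⟩, if_neg (by omega : ¬ k ≤ PySem.List.len out)]
      have h := hpt x hx hxl ho
      cases ps? with
      | none =>
          rw [pvScan_eq limit k ps none (x + 2) _ (by omega) (by omega) hpt]
          simp only [h]
      | some l =>
          rw [pvScan_eq limit k ps (some l) (x + 2) _ (by omega) (by omega) hpt]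
          simp only [h]
    · rw [dif_neg (by tauto), if_pos (by omega : k ≤ PySem.List.len out)]
  · rw [dif_neg (by tauto), dif_neg (by omega : ¬ x < limit + 1)]
  termination_by (limit + 1 - x).toNat
  decreasing_by all_goals omega

-- ===== VERDICT (by name: the statement is the Claim_ definition above) =====
theorem odd_composites_spec : Claim_equal_odd_composites := by
  intro limit k primes_set _
  unfold Spec_odd_composites odd_composites odd_composites_alt
  cases primes_set with
  | none =>
      exact pvScan_eq limit k _ none 9 [] (by omega) (by omega)
        (fun y h9 hl ho => pvCond_none limit y h9 hl ho)
  | some l =>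
      refine pvScan_eq limit k l (some l) 9 [] (by omega) (by omega) ?_
      intro y h9 hl ho
      have hm1 : PySem.Int.mod y 2 = 1 := by
        have := PySem.Int.mod_eq_emod_of_pos (a := y) (b := 2) (by norm_num)
        omega
      exact ⟨fun h => h.2, fun h => ⟨hm1, h⟩⟩
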